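-- pv_equiv track=rewrite | github.com/runnerup96/open-kgqa | preprocessing_utils.py | preprocess_sparql
-- ===== SOURCE A (Python) =====
-- def is_schema_token(token, schema_componenents):
--     for ns in schema_componenents:
--         if token.startswith(ns):
--             return True
--     return False
--
-- def preprocess_sparql(sparql):
--     # make tokenization easier
--     sparql = sparql.replace('\n', ' ')
--     sparql = sparql.replace('{', ' { ')
--     sparql = sparql.replace('}', ' } ')
--     sparql = sparql.replace('(', ' ( ')
--     sparql = sparql.replace(')', ' ) ')
--     sparql = sparql.replace('[', ' [ ')
--     sparql = sparql.replace(']', ' ] ')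
--     sparql = sparql.replace(',', ' , ')
--     sparql = sparql.replace('.', ' . ')
--     sparql = sparql.replace('|', ' | ')
--     sparql = sparql.replace('/', ' / ')
--     sparql = sparql.replace(';', ' ; ')
--
--
--     # sparql = sparql.replace(' ?', '_?')
--
--     sparql = sparql.strip()
--     sparql_tokens = sparql.split()
--     updated_lower_sparql = []
--     for token in sparql_tokens:
--         token = token.strip()
--         if is_schema_token(token, ['dr:', 'wd:', 'wdt:', 'p:', 'pq:', 'ps:', 'psn:']) == False:
--             updated_lower_sparql.append(token.lower())
--         else:
--             updated_lower_sparql.append(token)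
--
--     updated_lower_sparql = " ".join(updated_lower_sparql).strip()
--     updated_lower_sparql = updated_lower_sparql.replace('. }', ' }')
--
--     return updated_lower_sparql
-- ===== SOURCE B (Python) =====
-- DELIMS = frozenset('{}()[],.|/;')
-- PREFIXES = ('dr:', 'wd:', 'wdt:', 'p:', 'pq:', 'ps:', 'psn:')
--
-- def _emit(tokens, word):
--     # finish the current word, normalizing its case unless it is a schema token
--     if word:
--         t = ''.join(word)
--         tokens.append(t if t.startswith(PREFIXES) else t.lower())
--         word.clear()
--
-- def preprocess_sparql(sparql):
--     # single-pass tokenizer: no padded intermediate string, no split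
--     tokens = []
--     word = []
--     for c in sparql:
--         if c in DELIMS:
--             _emit(tokens, word)
--             tokens.append(c)
--         elif c.isspace():
--             _emit(tokens, word)
--         else:
--             word.append(c)
--     _emit(tokens, word)
--     return ' '.join(tokens).strip().replace('. }', ' }')
-- ===== Notes on version B (the rewrite author's own statement) =====
-- stated objective: alternative
-- what changed: Replaces A's staged pipeline (12 sequential whole-string replace passes, then strip, split and a classify loop over the token list) with a single-pass state-machine tokenizer that scans the characters once, accumulating the current word and emitting classified tokens directly, so no padded intermediate string or split step exists.
import Mathlib
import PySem

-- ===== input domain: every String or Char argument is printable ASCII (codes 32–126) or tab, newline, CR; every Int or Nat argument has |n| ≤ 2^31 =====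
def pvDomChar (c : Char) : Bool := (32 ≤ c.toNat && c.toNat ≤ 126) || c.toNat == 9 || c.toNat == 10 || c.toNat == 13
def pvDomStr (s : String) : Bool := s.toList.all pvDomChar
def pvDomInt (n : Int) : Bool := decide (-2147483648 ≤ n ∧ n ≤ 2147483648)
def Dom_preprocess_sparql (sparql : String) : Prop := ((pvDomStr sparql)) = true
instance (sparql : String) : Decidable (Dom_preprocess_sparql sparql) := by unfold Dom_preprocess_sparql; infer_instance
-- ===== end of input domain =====

-- B replaces A's staged pipeline (12 whole-string replace passes, strip, split, classify loop)
-- by a single-pass state-machine tokenizer that emits normalized tokens directly; objective: simpler structure, same asymptotic cost.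

-- ===== PORT A =====
def is_schema_token (token : String) (schema_componenents : List String) : Bool :=
  match schema_componenents with
  | [] => false
  | ns :: rest => if PySem.Str.startswith token ns then true else is_schema_token token rest

def preprocess_sparql (sparql : String) : String :=
  let s1 := PySem.Str.replace sparql "\n" " "
  let s2 := PySem.Str.replace s1 "{" " { "
  let s3 := PySem.Str.replace s2 "}" " } "
  let s4 := PySem.Str.replace s3 "(" " ( "
  let s5 := PySem.Str.replace s4 ")" " ) "
  let s6 := PySem.Str.replace s5 "[" " [ "
  let s7 := PySem.Str.replace s6 "]" " ] "
  let s8 := PySem.Str.replace s7 "," " , "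
  let s9 := PySem.Str.replace s8 "." " . "
  let s10 := PySem.Str.replace s9 "|" " | "
  let s11 := PySem.Str.replace s10 "/" " / "
  let s12 := PySem.Str.replace s11 ";" " ; "
  let stripped := PySem.Str.strip s12
  let sparql_tokens := PySem.Str.split₀ stripped
  let updated_lower_sparql := sparql_tokens.foldl (fun acc token =>
    let token := PySem.Str.strip token
    if (is_schema_token token ["dr:", "wd:", "wdt:", "p:", "pq:", "ps:", "psn:"] == false) then
      acc ++ [PySem.Str.lower token]
    else
      acc ++ [token]) []
  let joined := PySem.Str.strip (PySem.Str.join " " updated_lower_sparql)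
  PySem.Str.replace joined ". }" " }"

-- ===== PORT B =====
-- Source B's classification inside _emit: keep schema tokens, lower the rest
def pvClassify (t : String) : String :=
  if (["dr:", "wd:", "wdt:", "p:", "pq:", "ps:", "psn:"].any (fun p => PySem.Str.startswith t p)) then t
  else PySem.Str.lower t

-- Source B's _emit: finish the current word (if any) as a classified token
def pvEmit (tokens : List String) (word : List Char) : List String :=
  if word.isEmpty then tokens else tokens ++ [pvClassify (String.ofList word)]

-- Source B's loop body: delimiter → emit word then the delimiter; space → emit word; else extend word
def pvStep (st : List String × List Char) (c : Char) : List String × List Char :=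
  if ("{}()[],.|/;".toList).contains c then (pvEmit st.1 st.2 ++ [String.ofList [c]], [])
  else if PySem.Chars.isspace c then (pvEmit st.1 st.2, [])
  else (st.1, st.2 ++ [c])

def preprocess_sparql_alt (sparql : String) : String :=
  let st := sparql.toList.foldl pvStep ([], [])
  let tokens := pvEmit st.1 st.2
  PySem.Str.replace (PySem.Str.strip (PySem.Str.join " " tokens)) ". }" " }"

-- ===== PRECONDITION & SPEC =====
def Spec_preprocess_sparql (sparql : String) (out : String) : Prop := out = preprocess_sparql_alt sparql
instance (sparql : String) (out : String) : Decidable (Spec_preprocess_sparql sparql out) := by unfold Spec_preprocess_sparql; infer_instance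

-- ===== CLAIM (what is proved, stated in full; the proofs are below) =====
def Claim_equal_preprocess_sparql : Prop := ∀ (sparql : String), Dom_preprocess_sparql sparql → Spec_preprocess_sparql sparql (preprocess_sparql sparql)

-- ===== LEMMAS AND PROOFS =====

-- proof device: what one padding pass does to one character (A's 12 replaces fused)
def pvPadChar (c : Char) : List Char :=
  if ("{}()[],.|/;".toList).contains c then [' ', c, ' ']
  else if c = '\n' then [' ']
  else [c]

-- equation lemmas for the fuelled replace loop
theorem pvReplaceGo_zero (old new : List Char) (l acc : List Char) :
    PySem.Chars.replace.go old new 0 l acc = acc.reverse ++ l := rfl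

theorem pvReplaceGo_nil (old new : List Char) (fuel : Nat) (acc : List Char) :
    PySem.Chars.replace.go old new (fuel + 1) [] acc = acc.reverse := rfl

theorem pvReplaceGo_cons (old new : List Char) (fuel : Nat) (c : Char) (t acc : List Char) :
    PySem.Chars.replace.go old new (fuel + 1) (c :: t) acc =
      if old.isPrefixOf (c :: t) then
        PySem.Chars.replace.go old new fuel (List.drop old.length (c :: t)) (new.reverse ++ acc)
      else PySem.Chars.replace.go old new fuel t (c :: acc) := rfl

theorem pvReplaceGo_single (c : Char) (new : List Char) :
    ∀ (l : List Char) (fuel : Nat) (acc : List Char), l.length ≤ fuel →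
      PySem.Chars.replace.go [c] new fuel l acc =
        acc.reverse ++ l.flatMap (fun x => if x = c then new else [x]) := by
  intro l
  induction l with
  | nil =>
    intro fuel acc _
    cases fuel with
    | zero => simp [pvReplaceGo_zero]
    | succ n => simp [pvReplaceGo_nil]
  | cons x t ih =>
    intro fuel acc h
    cases fuel with
    | zero => simp at h
    | succ n =>
      rw [pvReplaceGo_cons]
      by_cases hx : x = c
      · subst hx
        have hp : [x].isPrefixOf (x :: t) = true := by simp [List.isPrefixOf]
        rw [if_pos hp]
        rw [show List.drop ([x].length) (x :: t) = t from rfl]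
        rw [ih _ _ (by simpa using Nat.succ_le_succ_iff.mp h)]
        simp
      · have hp : [c].isPrefixOf (x :: t) = false := by
          simp [List.isPrefixOf]; exact fun h' => hx h'.symm
        rw [if_neg (by simp [hp])]
        rw [ih _ _ (by simpa using Nat.succ_le_succ_iff.mp h)]
        simp [hx]

theorem pvReplace_single (s : List Char) (c : Char) (new : List Char) :
    PySem.Chars.replace s [c] new = s.flatMap (fun x => if x = c then new else [x]) := by
  show PySem.Chars.replace.go [c] new s.length s [] = _
  rw [pvReplaceGo_single c new s s.length [] le_rfl]
  simp

theorem pvFlatMap_comp {α : Type} (l : List α) (f g : α → List α) :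
    (l.flatMap f).flatMap g = l.flatMap (fun x => (f x).flatMap g) := by
  induction l with
  | nil => rfl
  | cons c t ih => simp [List.flatMap_cons, List.flatMap_append, ih]

theorem pvFlatMap_congr {α β : Type} (l : List α) (f g : α → List β) (h : ∀ x, f x = g x) :
    l.flatMap f = l.flatMap g := by
  induction l with
  | nil => rfl
  | cons c t ih => simp [List.flatMap_cons, h, ih]

-- the 12 sequential single-char replaces equal one pvPadChar pass
theorem pvPad_eq (l : List Char) :
    (((((((((((l.flatMap (fun x => if x = '\n' then [' '] else [x])).flatMap
      (fun x => if x = '{' then [' ', '{', ' '] else [x])).flatMap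
      (fun x => if x = '}' then [' ', '}', ' '] else [x])).flatMap
      (fun x => if x = '(' then [' ', '(', ' '] else [x])).flatMap
      (fun x => if x = ')' then [' ', ')', ' '] else [x])).flatMap
      (fun x => if x = '[' then [' ', '[', ' '] else [x])).flatMap
      (fun x => if x = ']' then [' ', ']', ' '] else [x])).flatMap
      (fun x => if x = ',' then [' ', ',', ' '] else [x])).flatMap
      (fun x => if x = '.' then [' ', '.', ' '] else [x])).flatMap
      (fun x => if x = '|' then [' ', '|', ' '] else [x])).flatMap
      (fun x => if x = '/' then [' ', '/', ' '] else [x])).flatMap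
      (fun x => if x = ';' then [' ', ';', ' '] else [x]) = l.flatMap pvPadChar := by
  repeat rw [pvFlatMap_comp]
  apply pvFlatMap_congr
  intro x
  by_cases h0 : x = '\n'; · subst h0; decide
  by_cases h1 : x = '{'; · subst h1; decide
  by_cases h2 : x = '}'; · subst h2; decide
  by_cases h3 : x = '('; · subst h3; decide
  by_cases h4 : x = ')'; · subst h4; decide
  by_cases h5 : x = '['; · subst h5; decide
  by_cases h6 : x = ']'; · subst h6; decide
  by_cases h7 : x = ','; · subst h7; decide
  by_cases h8 : x = '.'; · subst h8; decide
  by_cases h9 : x = '|'; · subst h9; decide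
  by_cases h10 : x = '/'; · subst h10; decide
  by_cases h11 : x = ';'; · subst h11; decide
  simp only [if_neg h0, if_neg h1, if_neg h2, if_neg h3, if_neg h4, if_neg h5, if_neg h6,
    if_neg h7, if_neg h8, if_neg h9, if_neg h10, if_neg h11, List.flatMap_cons, List.flatMap_nil,
    List.append_nil]
  rw [pvPadChar]
  have hc : (("{}()[],.|/;".toList).contains x) = false := by
    rw [show "{}()[],.|/;".toList = ['{','}','(',')','[',']',',','.','|','/',';'] from rfl]
    simp [h1, h2, h3, h4, h5, h6, h7, h8, h9, h10, h11]
  rw [hc]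
  simp [h0]

-- equation lemmas for split₀.go
theorem pvSplitGo_nil' (cur : List Char) (acc : List (List Char)) :
    PySem.Chars.split₀.go [] cur acc =
      if cur.isEmpty then acc.reverse else (cur.reverse :: acc).reverse := rfl

theorem pvSplitGo_cons (c : Char) (s cur : List Char) (acc : List (List Char)) :
    PySem.Chars.split₀.go (c :: s) cur acc =
      if PySem.Chars.isspace c then
        (if cur.isEmpty then PySem.Chars.split₀.go s [] acc
         else PySem.Chars.split₀.go s [] (cur.reverse :: acc))
      else PySem.Chars.split₀.go s (c :: cur) acc := rfl

-- split₀ ignores a leading whitespace prefix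
theorem pvSplit_lstrip (s : List Char) (acc : List (List Char)) :
    PySem.Chars.split₀.go (List.dropWhile PySem.Chars.isspace s) [] acc =
      PySem.Chars.split₀.go s [] acc := by
  induction s generalizing acc with
  | nil => rfl
  | cons c t ih =>
    by_cases h : PySem.Chars.isspace c
    · rw [List.dropWhile_cons_of_pos h, ih, pvSplitGo_cons, if_pos h]
      simp
    · rw [List.dropWhile_cons_of_neg (by simp [h])]

-- split₀.go on an all-whitespace list equals its value on []
theorem pvSplitGo_allspace (ws : List Char) (cur : List Char) (acc : List (List Char))
    (h : ∀ x ∈ ws, PySem.Chars.isspace x = true) :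
    PySem.Chars.split₀.go ws cur acc = PySem.Chars.split₀.go [] cur acc := by
  induction ws generalizing cur acc with
  | nil => rfl
  | cons c t ih =>
    rw [pvSplitGo_cons, if_pos (h c (by simp))]
    by_cases hc : cur.isEmpty
    · rw [if_pos hc, ih _ _ (fun x hx => h x (by simp [hx])), pvSplitGo_nil', pvSplitGo_nil',
        if_pos hc]
      simp
    · rw [if_neg hc, ih _ _ (fun x hx => h x (by simp [hx])), pvSplitGo_nil', pvSplitGo_nil',
        if_neg hc]
      simp

-- split₀ ignores a trailing whitespace suffix
theorem pvSplitGo_append_space (s ws : List Char) (cur : List Char) (acc : List (List Char))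
    (h : ∀ x ∈ ws, PySem.Chars.isspace x = true) :
    PySem.Chars.split₀.go (s ++ ws) cur acc = PySem.Chars.split₀.go s cur acc := by
  induction s generalizing cur acc with
  | nil => simpa using pvSplitGo_allspace ws cur acc h
  | cons c t ih =>
    rw [List.cons_append, pvSplitGo_cons, pvSplitGo_cons]
    by_cases hc : PySem.Chars.isspace c
    · rw [if_pos hc, if_pos hc]
      by_cases he : cur.isEmpty
      · rw [if_pos he, if_pos he, ih]
      · rw [if_neg he, if_neg he, ih]
    · rw [if_neg hc, if_neg hc, ih]

theorem pvSplit_strip (s : List Char) :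
    PySem.Chars.split₀ (PySem.Chars.strip s) = PySem.Chars.split₀ s := by
  show PySem.Chars.split₀.go (PySem.Chars.rstrip (PySem.Chars.lstrip s)) [] [] = _
  have hdecomp : PySem.Chars.lstrip s =
      PySem.Chars.rstrip (PySem.Chars.lstrip s) ++
        (List.takeWhile PySem.Chars.isspace (PySem.Chars.lstrip s).reverse).reverse := by
    unfold PySem.Chars.rstrip
    calc PySem.Chars.lstrip s = ((PySem.Chars.lstrip s).reverse).reverse := (List.reverse_reverse _).symm
      _ = (List.takeWhile PySem.Chars.isspace (PySem.Chars.lstrip s).reverse ++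
            List.dropWhile PySem.Chars.isspace (PySem.Chars.lstrip s).reverse).reverse := by
            rw [List.takeWhile_append_dropWhile]
      _ = _ := by rw [List.reverse_append]
  have h1 : PySem.Chars.split₀.go (PySem.Chars.lstrip s) [] [] =
      PySem.Chars.split₀.go (PySem.Chars.rstrip (PySem.Chars.lstrip s)) [] [] := by
    conv_lhs => rw [hdecomp]
    exact pvSplitGo_append_space _ _ _ _ (by
      intro x hx
      simp only [List.mem_reverse] at hx
      exact List.mem_takeWhile_imp hx)
  rw [← h1]
  exact pvSplit_lstrip s []

-- every token produced by split₀ is nonempty and whitespace-free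
theorem pvSplitGo_tokens (s : List Char) (cur : List Char) (acc : List (List Char))
    (hcur : ∀ x ∈ cur, PySem.Chars.isspace x = false)
    (hacc : ∀ t ∈ acc, t ≠ [] ∧ ∀ x ∈ t, PySem.Chars.isspace x = false) :
    ∀ t ∈ PySem.Chars.split₀.go s cur acc, t ≠ [] ∧ ∀ x ∈ t, PySem.Chars.isspace x = false := by
  induction s generalizing cur acc with
  | nil =>
    rw [pvSplitGo_nil']
    by_cases he : cur.isEmpty
    · rw [if_pos he]; intro t ht; exact hacc t (by simpa using ht)
    · rw [if_neg he]
      intro t ht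
      simp only [List.reverse_cons, List.mem_append, List.mem_reverse, List.mem_singleton] at ht
      rcases ht with ht | ht
      · exact hacc t ht
      · subst ht
        refine ⟨by simpa [List.isEmpty_iff] using he, fun x hx => hcur x (by simpa using hx)⟩
  | cons c t ih =>
    rw [pvSplitGo_cons]
    by_cases hc : PySem.Chars.isspace c
    · rw [if_pos hc]
      by_cases he : cur.isEmpty
      · rw [if_pos he]; exact ih [] acc (by simp) hacc
      · rw [if_neg he]
        refine ih [] _ (by simp) ?_
        intro u hu
        rcases List.mem_cons.mp hu with hu | hu
        · subst hu
          exact ⟨by simpa [List.isEmpty_iff] using he, fun x hx => hcur x (by simpa using hx)⟩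
        · exact hacc u hu
    · rw [if_neg hc]
      refine ih (c :: cur) acc ?_ hacc
      intro x hx
      rcases List.mem_cons.mp hx with hx | hx
      · subst hx; simpa using hc
      · exact hcur x hx

theorem pvDropWhile_no (l : List Char) (h : ∀ x ∈ l, PySem.Chars.isspace x = false) :
    List.dropWhile PySem.Chars.isspace l = l := by
  cases l with
  | nil => rfl
  | cons c t => rw [List.dropWhile_cons_of_neg (by simp [h c (by simp)])]

theorem pvStrip_no_space (t : List Char) (h : ∀ x ∈ t, PySem.Chars.isspace x = false) :
    PySem.Chars.strip t = t := by
  unfold PySem.Chars.strip PySem.Chars.lstrip PySem.Chars.rstrip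
  rw [pvDropWhile_no t h, pvDropWhile_no t.reverse (fun x hx => h x (List.mem_reverse.mp hx)),
    List.reverse_reverse]

theorem pvSchema_any (t : String) (l : List String) :
    is_schema_token t l = l.any (fun p => PySem.Str.startswith t p) := by
  induction l with
  | nil => rfl
  | cons p rest ih =>
    rw [is_schema_token, List.any_cons, ih]
    cases h : PySem.Str.startswith t p
    · simp
    · simp

-- A's append loop is a map of pvClassify over whitespace-free tokens
theorem pvFold_map (toks : List String) (acc : List String)
    (h : ∀ t ∈ toks, ∀ x ∈ t.toList, PySem.Chars.isspace x = false) :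
    toks.foldl (fun acc token =>
      let token := PySem.Str.strip token
      if (is_schema_token token ["dr:", "wd:", "wdt:", "p:", "pq:", "ps:", "psn:"] == false) then
        acc ++ [PySem.Str.lower token]
      else
        acc ++ [token]) acc = acc ++ toks.map pvClassify := by
  induction toks generalizing acc with
  | nil => simp
  | cons t rest ih =>
    have hst : PySem.Str.strip t = t := by
      apply String.toList_inj.mp
      rw [PySem.Str.toList_strip]
      exact pvStrip_no_space _ (h t (by simp))
    rw [List.foldl_cons, List.map_cons]
    simp only [hst]
    rw [ih _ (fun u hu => h u (by simp [hu]))]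
    rw [pvSchema_any]
    unfold pvClassify
    cases hs : (["dr:", "wd:", "wdt:", "p:", "pq:", "ps:", "psn:"].any
        (fun p => PySem.Str.startswith t p)) with
    | false => simp
    | true => simp

-- ===== B-side lemmas: the single-pass tokenizer equals split₀ of the padded list =====

-- split₀.go's accumulator factors out
theorem pvSplitGo_acc (s : List Char) (cur : List Char) (acc : List (List Char)) :
    PySem.Chars.split₀.go s cur acc = acc.reverse ++ PySem.Chars.split₀.go s cur [] := by
  induction s generalizing cur acc with
  | nil =>
    rw [pvSplitGo_nil', pvSplitGo_nil']
    by_cases he : cur.isEmpty <;> simp [he]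
  | cons c t ih =>
    rw [pvSplitGo_cons, pvSplitGo_cons]
    by_cases hc : PySem.Chars.isspace c
    · rw [if_pos hc, if_pos hc]
      by_cases he : cur.isEmpty
      · rw [if_pos he, if_pos he, ih]
      · rw [if_neg he, if_neg he, ih _ (cur.reverse :: acc), ih _ [cur.reverse]]
        simp
    · rw [if_neg hc, if_neg hc, ih]

theorem pvDelim_not_space (c : Char) (h : ("{}()[],.|/;".toList).contains c = true) :
    PySem.Chars.isspace c = false := by
  rw [show "{}()[],.|/;".toList = ['{','}','(',')','[',']',',','.','|','/',';'] from rfl] at h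
  simp only [List.contains_eq_mem, decide_eq_true_eq] at h
  fin_cases h <;> decide

theorem pvDelim_classify (c : Char) (h : ("{}()[],.|/;".toList).contains c = true) :
    pvClassify (String.ofList [c]) = String.ofList [c] := by
  rw [show "{}()[],.|/;".toList = ['{','}','(',')','[',']',',','.','|','/',';'] from rfl] at h
  simp only [List.contains_eq_mem, decide_eq_true_eq] at h
  fin_cases h <;> decide

-- BRIDGE: B's fold over the raw characters computes the classified split₀ tokens of the padded list
theorem pvBridge (l : List Char) : ∀ (cur : List Char) (acc : List String),
    (let st := l.foldl pvStep (acc, cur); pvEmit st.1 st.2) =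
      acc ++ (PySem.Chars.split₀.go (l.flatMap pvPadChar) cur.reverse []).map
        (fun t => pvClassify (String.ofList t)) := by
  induction l with
  | nil =>
    intro cur acc
    simp only [List.foldl_nil, List.flatMap_nil, pvSplitGo_nil']
    by_cases he : cur.isEmpty
    · simp [pvEmit, he]
    · rw [if_neg (by simpa using he)]
      simp [pvEmit, he]
  | cons c t ih =>
    intro cur acc
    simp only [List.foldl_cons, List.flatMap_cons]
    by_cases hd : ("{}()[],.|/;".toList).contains c = true
    · have hns := pvDelim_not_space c hd
      rw [show pvStep (acc, cur) c = (pvEmit acc cur ++ [String.ofList [c]], []) from by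
        unfold pvStep; rw [if_pos hd]]
      rw [ih [] (pvEmit acc cur ++ [String.ofList [c]])]
      rw [show pvPadChar c = [' ', c, ' '] from by unfold pvPadChar; rw [if_pos hd]]
      rw [show ([' ', c, ' '] ++ t.flatMap pvPadChar) = ' ' :: c :: ' ' :: t.flatMap pvPadChar
        from rfl]
      rw [pvSplitGo_cons, if_pos (by decide)]
      by_cases he : cur.isEmpty = true
      · rw [if_pos (by simpa using he)]
        rw [pvSplitGo_cons, if_neg (by simp [hns]), pvSplitGo_cons, if_pos (by decide),
          if_neg (by simp)]
        rw [pvSplitGo_acc _ _ [[c].reverse]]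
        simp only [List.reverse_nil, List.reverse_cons, List.nil_append, List.map_append,
          List.map_cons, List.map_nil]
        rw [pvDelim_classify c hd]
        simp [pvEmit, he]
      · rw [if_neg (by simpa using he)]
        rw [pvSplitGo_cons, if_neg (by simp [hns]), pvSplitGo_cons, if_pos (by decide),
          if_neg (by simp)]
        rw [pvSplitGo_acc _ _ [[c].reverse, cur.reverse.reverse]]
        simp only [List.reverse_nil, List.reverse_cons, List.nil_append, List.map_append,
          List.map_cons, List.map_nil, List.reverse_reverse]
        rw [pvDelim_classify c hd]
        simp [pvEmit, he]
    · have hd' : ("{}()[],.|/;".toList).contains c = false := by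
        cases h : ("{}()[],.|/;".toList).contains c
        · rfl
        · exact absurd h hd
      by_cases hs : PySem.Chars.isspace c = true
      · rw [show pvStep (acc, cur) c = (pvEmit acc cur, []) from by
          unfold pvStep; rw [if_neg hd, if_pos hs]]
        rw [ih [] (pvEmit acc cur)]
        have hpadc : pvPadChar c = (if c = '\n' then [' '] else [c]) := by
          unfold pvPadChar; rw [if_neg hd]
        have hhead : ∃ sp, pvPadChar c = [sp] ∧ PySem.Chars.isspace sp = true := by
          by_cases hn : c = '\n'
          · exact ⟨' ', by rw [hpadc, if_pos hn], by decide⟩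
          · exact ⟨c, by rw [hpadc, if_neg hn], hs⟩
        obtain ⟨sp, hsp, hsps⟩ := hhead
        rw [hsp, show ([sp] ++ t.flatMap pvPadChar) = sp :: t.flatMap pvPadChar from rfl]
        rw [pvSplitGo_cons, if_pos hsps]
        by_cases he : cur.isEmpty = true
        · rw [if_pos (by simpa using he)]
          simp [pvEmit, he]
        · rw [if_neg (by simpa using he)]
          rw [pvSplitGo_acc _ _ [cur.reverse.reverse]]
          simp only [List.reverse_nil, List.reverse_cons, List.nil_append, List.map_append,
            List.map_cons, List.map_nil, List.reverse_reverse]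
          simp [pvEmit, he]
      · have hs' : PySem.Chars.isspace c = false := by
          cases h : PySem.Chars.isspace c
          · rfl
          · exact absurd h hs
        have hn : ¬ c = '\n' := by
          intro h
          subst h
          exact absurd hs' (by decide)
        rw [show pvStep (acc, cur) c = (acc, cur ++ [c]) from by
          unfold pvStep; rw [if_neg hd, if_neg (by simp [hs'])]]
        rw [ih (cur ++ [c]) acc]
        rw [show pvPadChar c = [c] from by
          unfold pvPadChar; rw [if_neg hd, if_neg hn]]
        rw [show ([c] ++ t.flatMap pvPadChar) = c :: t.flatMap pvPadChar from rfl]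
        rw [pvSplitGo_cons, if_neg (by simp [hs'])]
        simp

-- ===== VERDICT (by name: the statement is the Claim_ definition above) =====
theorem preprocess_sparql_spec : Claim_equal_preprocess_sparql := by
  unfold Claim_equal_preprocess_sparql
  intro sparql _
  unfold Spec_preprocess_sparql
  simp only [preprocess_sparql, preprocess_sparql_alt]
  have hpad :
      (PySem.Str.replace (PySem.Str.replace (PySem.Str.replace (PySem.Str.replace
        (PySem.Str.replace (PySem.Str.replace (PySem.Str.replace (PySem.Str.replace
        (PySem.Str.replace (PySem.Str.replace (PySem.Str.replace (PySem.Str.replace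
        sparql "\n" " ") "{" " { ") "}" " } ") "(" " ( ") ")" " ) ") "[" " [ ") "]" " ] ")
        "," " , ") "." " . ") "|" " | ") "/" " / ") ";" " ; ").toList
        = sparql.toList.flatMap pvPadChar := by
    simp only [PySem.Str.toList_replace]
    rw [show ("\n" : String).toList = ['\n'] from rfl, show (" " : String).toList = [' '] from rfl,
      show ("{" : String).toList = ['{'] from rfl, show (" { " : String).toList = [' ','{',' '] from rfl,
      show ("}" : String).toList = ['}'] from rfl, show (" } " : String).toList = [' ','}',' '] from rfl,
      show ("(" : String).toList = ['('] from rfl, show (" ( " : String).toList = [' ','(',' '] from rfl,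
      show (")" : String).toList = [')'] from rfl, show (" ) " : String).toList = [' ',')',' '] from rfl,
      show ("[" : String).toList = ['['] from rfl, show (" [ " : String).toList = [' ','[',' '] from rfl,
      show ("]" : String).toList = [']'] from rfl, show (" ] " : String).toList = [' ',']',' '] from rfl,
      show ("," : String).toList = [','] from rfl, show (" , " : String).toList = [' ',',',' '] from rfl,
      show ("." : String).toList = ['.'] from rfl, show (" . " : String).toList = [' ','.',' '] from rfl,
      show ("|" : String).toList = ['|'] from rfl, show (" | " : String).toList = [' ','|',' '] from rfl,
      show ("/" : String).toList = ['/'] from rfl, show (" / " : String).toList = [' ','/',' '] from rfl,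
      show (";" : String).toList = [';'] from rfl, show (" ; " : String).toList = [' ',';',' '] from rfl]
    repeat rw [pvReplace_single]
    exact pvPad_eq sparql.toList
  have htoks : PySem.Str.split₀ (PySem.Str.strip (PySem.Str.replace (PySem.Str.replace (PySem.Str.replace (PySem.Str.replace
        (PySem.Str.replace (PySem.Str.replace (PySem.Str.replace (PySem.Str.replace
        (PySem.Str.replace (PySem.Str.replace (PySem.Str.replace (PySem.Str.replace
        sparql "\n" " ") "{" " { ") "}" " } ") "(" " ( ") ")" " ) ") "[" " [ ") "]" " ] ")
        "," " , ") "." " . ") "|" " | ") "/" " / ") ";" " ; "))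
      = PySem.Str.split₀ (String.ofList (sparql.toList.flatMap pvPadChar)) := by
    apply List.map_injective_iff.mpr (fun a b hab => String.toList_inj.mp hab)
    rw [PySem.Str.split₀_map_toList, PySem.Str.split₀_map_toList, PySem.Str.toList_strip, hpad,
      pvSplit_strip]
    simp
  have hprop : ∀ t ∈ PySem.Str.split₀ (String.ofList (sparql.toList.flatMap pvPadChar)),
      ∀ x ∈ t.toList, PySem.Chars.isspace x = false := by
    intro t ht x hx
    have hmem : t.toList ∈ List.map String.toList
        (PySem.Str.split₀ (String.ofList (sparql.toList.flatMap pvPadChar))) :=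
      List.mem_map_of_mem ht
    rw [PySem.Str.split₀_map_toList] at hmem
    exact (pvSplitGo_tokens _ [] [] (by simp) (by simp) t.toList hmem).2 x hx
  rw [htoks, pvFold_map _ [] hprop, List.nil_append]
  -- both sides are replace/strip/join of the same token list; equate the token lists
  have hB : (let st := sparql.toList.foldl pvStep ([], []); pvEmit st.1 st.2) =
      (PySem.Str.split₀ (String.ofList (sparql.toList.flatMap pvPadChar))).map pvClassify := by
    rw [pvBridge sparql.toList [] []]
    simp only [List.reverse_nil]
    have hsplit : PySem.Chars.split₀.go (sparql.toList.flatMap pvPadChar) [] [] =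
        List.map String.toList
          (PySem.Str.split₀ (String.ofList (sparql.toList.flatMap pvPadChar))) := by
      rw [PySem.Str.split₀_map_toList]
      simp [PySem.Chars.split₀]
    rw [hsplit, List.nil_append, List.map_map]
    apply List.map_congr_left
    intro t _
    simp
  simp only [hB]
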